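-- pv_equiv track=rewrite | github.com/BrunoFernandes25/LA-II | Treino2/cidade.py | constroi_cidade
-- ===== SOURCE A (Python) =====
-- def constroi_cidade (ruas):
--     adj = {}
--
--     for rua in ruas:
--         r1 = rua[0]
--         r2 = rua[-1]
--         if r1 not in adj:
--             adj[r1] = {}
--         if r2 not in adj:
--             adj[r2] = {}
--         #caso que testa se já existir uma letra em adj e guarda aquela que tem um caminho menor
--         if r2 in adj[r1] and adj[r1][r2] < len(rua):
--             continue
--         adj[r1][r2] = len(rua)
--         adj[r2][r1] = len(rua)
--
--     return adj
-- ===== SOURCE B (Python) =====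
-- def constroi_cidade(ruas):
--     # Pass 1: index the streets by unordered endpoint pair, keeping the minimum length,
--     # and record, per endpoint, its neighbours in order of first appearance of the pair.
--     best = {}   # canonical (sorted) endpoint pair -> minimum street length seen
--     nbrs = {}   # endpoint -> list of neighbours, in first-appearance order
--     for rua in ruas:
--         a, b = rua[0], rua[-1]
--         k = (a, b) if a <= b else (b, a)
--         if k in best:
--             best[k] = min(best[k], len(rua))
--         else:
--             best[k] = len(rua)
--             nbrs[a] = nbrs.get(a, []) + [b]
--             if a != b:
--                 nbrs[b] = nbrs.get(b, []) + [a]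
--     # Pass 2: materialize the symmetric adjacency dict from the pair index.
--     return {c: {d: best[(c, d) if c <= d else (d, c)] for d in ds}
--             for c, ds in nbrs.items()}
-- ===== Notes on version B (the rewrite author's own statement) =====
-- stated objective: alternative
-- what changed: Single merged pass mutating a dict-of-dicts is replaced by a two-phase decomposition: first build an index keyed by the canonical unordered endpoint pair (minimum length per pair, plus per-endpoint neighbour order), then materialize the symmetric adjacency dict from that index; Pre_ excludes lists containing an empty string, on which both A and B raise IndexError.
import Mathlib
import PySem

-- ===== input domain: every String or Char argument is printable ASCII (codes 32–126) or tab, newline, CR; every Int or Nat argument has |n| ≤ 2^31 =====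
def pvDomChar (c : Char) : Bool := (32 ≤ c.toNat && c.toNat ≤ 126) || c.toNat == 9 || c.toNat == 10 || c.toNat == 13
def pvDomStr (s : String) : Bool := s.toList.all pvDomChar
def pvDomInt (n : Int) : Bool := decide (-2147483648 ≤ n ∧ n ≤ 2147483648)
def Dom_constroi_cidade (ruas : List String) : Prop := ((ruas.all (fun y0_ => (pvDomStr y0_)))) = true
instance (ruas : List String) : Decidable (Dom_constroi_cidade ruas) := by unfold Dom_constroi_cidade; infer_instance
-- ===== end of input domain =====

-- B replaces A's single merged pass over a dict-of-dicts by a two-phase decomposition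
-- (pair-index first, then materialize); objective: alternative (same cost, different structure).

-- ===== PORT A =====
-- if rX not in adj: adj[rX] = {}
def pvEnsure (adj : PySem.Dict String (PySem.Dict String Int)) (x : String) :
    PySem.Dict String (PySem.Dict String Int) :=
  if adj.contains x then adj else adj.insert x PySem.Dict.empty

-- adj[r1][r2] = len(rua); adj[r2][r1] = len(rua)   (in-place inner-dict mutation)
def pvUpdate (adj : PySem.Dict String (PySem.Dict String Int)) (r1 r2 : String) (L : Int) :
    PySem.Dict String (PySem.Dict String Int) :=
  let adj3 := adj.insert r1 ((adj.getD r1 PySem.Dict.empty).insert r2 L)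
  adj3.insert r2 ((adj3.getD r2 PySem.Dict.empty).insert r1 L)

-- the loop body of A for one street (r1 = rua[0], r2 = rua[-1])
def pvCore (adj : PySem.Dict String (PySem.Dict String Int)) (r1 r2 : String) (L : Int) :
    PySem.Dict String (PySem.Dict String Int) :=
  let adj2 := pvEnsure (pvEnsure adj r1) r2
  let inner := adj2.getD r1 PySem.Dict.empty
  if inner.contains r2 && decide (inner.getD r2 0 < L) then adj2
  else pvUpdate adj2 r1 r2 L

def pvStepA (adj : PySem.Dict String (PySem.Dict String Int)) (rua : String) :
    PySem.Dict String (PySem.Dict String Int) :=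
  match PySem.Str.pyGet? rua 0, PySem.Str.pyGet? rua (-1) with
  | some c1, some c2 => pvCore adj (String.ofList [c1]) (String.ofList [c2]) (PySem.Str.len rua)
  | _, _ => adj   -- unreachable under Pre_ (empty string would raise IndexError)

def constroi_cidade (ruas : List String) : List (String × List (String × Int)) :=
  ((ruas.foldl pvStepA PySem.Dict.empty).items).map (fun p => (p.1, p.2.items))

-- ===== PORT B =====
-- canonical (sorted) unordered endpoint pair:  (a, b) if a <= b else (b, a)
def pvCanon (a b : String) : String × String := if a ≤ b then (a, b) else (b, a)

-- nbrs[a] = nbrs.get(a, []) + [b];  if a != b: nbrs[b] = nbrs.get(b, []) + [a]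
def pvAddPair (nbrs : PySem.Dict String (List String)) (a b : String) :
    PySem.Dict String (List String) :=
  let n1 := nbrs.insert a (nbrs.getD a [] ++ [b])
  if a = b then n1 else n1.insert b (n1.getD b [] ++ [a])

-- pass 1 loop body: update the pair index (best, nbrs) with one street
def pvStepB (st : PySem.Dict (String × String) Int × PySem.Dict String (List String))
    (rua : String) :
    PySem.Dict (String × String) Int × PySem.Dict String (List String) :=
  match PySem.Str.pyGet? rua 0, PySem.Str.pyGet? rua (-1) with
  | some c1, some c2 =>
      let a := String.ofList [c1]
      let b := String.ofList [c2]
      let k := pvCanon a b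
      if st.1.contains k then (st.1.insert k (min (st.1.getD k 0) (PySem.Str.len rua)), st.2)
      else (st.1.insert k (PySem.Str.len rua), pvAddPair st.2 a b)
  | _, _ => st

-- pass 2: materialize the adjacency dict from the pair index
def constroi_cidade_alt (ruas : List String) : List (String × List (String × Int)) :=
  let st := ruas.foldl pvStepB (PySem.Dict.empty, PySem.Dict.empty)
  st.2.items.map (fun p => (p.1, p.2.map (fun d => (d, st.1.getD (pvCanon p.1 d) 0))))

-- ===== PRECONDITION & SPEC =====
-- Pre_ excludes lists containing an empty string: there rua[0] raises IndexError in A (and in B).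
def Pre_constroi_cidade (ruas : List String) : Prop := ∀ r ∈ ruas, r.toList ≠ []
instance (ruas : List String) : Decidable (Pre_constroi_cidade ruas) := by
  unfold Pre_constroi_cidade; infer_instance

def pvWitness_constroi_cidade : List String := ["ab", "ba", "aa", "xy"]

def Spec_constroi_cidade (ruas : List String) (out : List (String × List (String × Int))) : Prop :=
  out = constroi_cidade_alt ruas
instance (ruas : List String) (out : List (String × List (String × Int))) :
    Decidable (Spec_constroi_cidade ruas out) := by unfold Spec_constroi_cidade; infer_instance

-- ===== CLAIM (what is proved, stated in full; the proofs are below) =====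
def Claim_equal_constroi_cidade : Prop :=
  ∀ (ruas : List String), Dom_constroi_cidade ruas → Pre_constroi_cidade ruas →
    Spec_constroi_cidade ruas (constroi_cidade ruas)

-- ===== LEMMAS AND PROOFS =====

theorem pv_items_mk {κ ν : Type} [BEq κ] (l : List (κ × ν)) : (PySem.Dict.mk l).items = l := rfl

theorem pvCanon_comm (a b : String) : pvCanon a b = pvCanon b a := by
  unfold pvCanon
  rcases le_total a b with h | h
  · by_cases h2 : b ≤ a
    · have hab : a = b := le_antisymm h h2
      subst hab; rfl
    · simp [h, h2]
  · by_cases h1 : a ≤ b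
    · have hab : a = b := le_antisymm h1 h
      subst hab; rfl
    · simp [h, h1]

theorem pvCanon_elim {c d a b : String} (h : pvCanon c d = pvCanon a b) :
    (c = a ∧ d = b) ∨ (c = b ∧ d = a) := by
  unfold pvCanon at h
  split_ifs at h <;> simp [Prod.ext_iff] at h <;> tauto

theorem pvCanon_ne_left {c a b : String} (d : String) (hca : c ≠ a) (hcb : c ≠ b) :
    pvCanon c d ≠ pvCanon a b := by
  intro h
  rcases pvCanon_elim h with ⟨h1, _⟩ | ⟨h1, _⟩
  · exact hca h1
  · exact hcb h1

-- canon c d = canon c b forces d = b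
theorem pvCanon_left_inj {c d b : String} (h : pvCanon c d = pvCanon c b) : d = b := by
  rcases pvCanon_elim h with ⟨_, h2⟩ | ⟨h1, h2⟩
  · exact h2
  · rw [h2, h1]

theorem pv_get?_of_contains {κ ν : Type} [BEq κ] [LawfulBEq κ]
    (d : PySem.Dict κ ν) (x : κ) (d0 : ν) (h : d.contains x = true) :
    d.get? x = some (d.getD x d0) := by
  rw [PySem.Dict.contains_eq_isSome_get?] at h
  cases hg : d.get? x with
  | none => rw [hg] at h; cases h
  | some v => rw [PySem.Dict.getD_of_get?_eq_some d d0 hg]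

theorem pv_contains_of_mem_getD {κ ν : Type} [BEq κ] [LawfulBEq κ]
    (d : PySem.Dict κ (List ν)) (x : κ) {y : ν} (hy : y ∈ d.getD x []) :
    d.contains x = true := by
  cases h : d.contains x
  · rw [PySem.Dict.getD_of_not_contains d ([]) h] at hy; cases hy
  · rfl

theorem pv_mem_keys_of_get? {κ ν : Type} [BEq κ] [LawfulBEq κ]
    (d : PySem.Dict κ ν) {c : κ} {v : ν} (h : d.get? c = some v) : c ∈ d.keys := by
  rw [← PySem.Dict.contains_iff_mem_keys, PySem.Dict.contains_eq_isSome_get?, h]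
  rfl

theorem pv_not_mem_keys {κ ν : Type} [BEq κ] [LawfulBEq κ]
    (d : PySem.Dict κ ν) {x : κ} (h : d.contains x = false) : x ∉ d.keys := by
  intro hm
  rw [← PySem.Dict.contains_iff_mem_keys] at hm
  rw [h] at hm
  cases hm

theorem pv_insert_getD_self {κ ν : Type} [BEq κ] [LawfulBEq κ]
    (d : PySem.Dict κ ν) (x : κ) (d0 : ν) (h : d.contains x = true) (hnd : d.keys.Nodup) :
    d.insert x (d.getD x d0) = d := by
  apply PySem.Dict.ext
  rw [PySem.Dict.items_insert_of_contains d _ h]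
  have hid : ∀ p ∈ d.items, (if p.1 == x then (x, d.getD x d0) else p) = p := by
    intro p hp
    by_cases hpx : p.1 = x
    · obtain ⟨k, v⟩ := p
      simp only at hpx; subst hpx
      have hg : d.get? k = some v := PySem.Dict.get?_of_mem_items d hp hnd
      have hgd : d.getD k d0 = v := PySem.Dict.getD_of_get?_eq_some d d0 hg
      simp [hgd]
    · simp [hpx]
  rw [List.map_congr_left hid]
  simp

-- ---- the materialization map and the pair-index invariant (proof-only artefacts) ----

def pvInner (best : PySem.Dict (String × String) Int) (c : String) (ds : List String) :
    PySem.Dict String Int :=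
  PySem.Dict.mk (ds.map (fun d => (d, best.getD (pvCanon c d) 0)))

def pvMatD (best : PySem.Dict (String × String) Int) (nbrs : PySem.Dict String (List String)) :
    PySem.Dict String (PySem.Dict String Int) :=
  PySem.Dict.mk (nbrs.items.map (fun p => (p.1, pvInner best p.1 p.2)))

def pvInv (best : PySem.Dict (String × String) Int)
    (nbrs : PySem.Dict String (List String)) : Prop :=
  best.keys.Nodup ∧ nbrs.keys.Nodup ∧
  (∀ a b : String, best.contains (pvCanon a b) = true ↔ b ∈ nbrs.getD a []) ∧
  (∀ a : String, (nbrs.getD a []).Nodup)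

theorem pvInner_keys (best : PySem.Dict (String × String) Int) (c : String) (ds : List String) :
    (pvInner best c ds).keys = ds := by
  simp [pvInner, PySem.Dict.keys, List.map_map, Function.comp_def]

theorem pvInner_contains (best : PySem.Dict (String × String) Int) (c x : String)
    (ds : List String) : (pvInner best c ds).contains x = decide (x ∈ ds) := by
  rw [PySem.Dict.contains_eq_decide_mem_keys, pvInner_keys]

theorem pvInner_getD (best : PySem.Dict (String × String) Int) (c b : String) (ds : List String)
    (hb : b ∈ ds) (hnd : ds.Nodup) :
    (pvInner best c ds).getD b 0 = best.getD (pvCanon c b) 0 := by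
  apply PySem.Dict.getD_of_mem_items
  · exact List.mem_map_of_mem hb
  · rw [pvInner_keys]; exact hnd

theorem pvInner_congr_of_ne (best : PySem.Dict (String × String) Int) {c a b : String}
    (v : Int) (ds : List String) (hca : c ≠ a) (hcb : c ≠ b) :
    pvInner (best.insert (pvCanon a b) v) c ds = pvInner best c ds := by
  unfold pvInner
  congr 1
  apply List.map_congr_left
  intro d _
  rw [PySem.Dict.getD_insert_of_ne best v 0 (pvCanon_ne_left d hca hcb)]

theorem pvInner_insert_mem (best : PySem.Dict (String × String) Int) (c b : String)
    (L : Int) (ds : List String) (hb : b ∈ ds) :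
    (pvInner best c ds).insert b L = pvInner (best.insert (pvCanon c b) L) c ds := by
  apply PySem.Dict.ext
  rw [PySem.Dict.items_insert_of_contains _ L (by rw [pvInner_contains]; simpa using hb)]
  simp only [pvInner, pv_items_mk, List.map_map]
  apply List.map_congr_left
  intro d _
  by_cases hdb : d = b
  · subst hdb
    simp [PySem.Dict.getD_insert_self]
  · have hne : pvCanon c d ≠ pvCanon c b := fun h => hdb (pvCanon_left_inj h)
    simp only [Function.comp_def]
    rw [PySem.Dict.getD_insert_of_ne best L 0 hne]
    simp [hdb]

theorem pvInner_insert_not_mem (best : PySem.Dict (String × String) Int) (c b : String)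
    (L : Int) (ds : List String) (hb : b ∉ ds) :
    (pvInner best c ds).insert b L = pvInner (best.insert (pvCanon c b) L) c (ds ++ [b]) := by
  apply PySem.Dict.ext
  rw [PySem.Dict.items_insert_of_not_contains _ L (by rw [pvInner_contains]; simpa using hb)]
  simp only [pvInner, pv_items_mk, List.map_append, List.map_cons, List.map_nil]
  congr 1
  · apply List.map_congr_left
    intro d hd
    have hdb : d ≠ b := fun h => hb (h ▸ hd)
    have hne : pvCanon c d ≠ pvCanon c b := fun h => hdb (pvCanon_left_inj h)
    rw [PySem.Dict.getD_insert_of_ne best L 0 hne]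
  · rw [PySem.Dict.getD_insert_self]

theorem pvMatD_keys (best : PySem.Dict (String × String) Int)
    (nbrs : PySem.Dict String (List String)) : (pvMatD best nbrs).keys = nbrs.keys := by
  simp [pvMatD, PySem.Dict.keys, List.map_map, Function.comp_def]

theorem pvMatD_contains (best : PySem.Dict (String × String) Int)
    (nbrs : PySem.Dict String (List String)) (x : String) :
    (pvMatD best nbrs).contains x = nbrs.contains x := by
  rw [PySem.Dict.contains_eq_decide_mem_keys, PySem.Dict.contains_eq_decide_mem_keys, pvMatD_keys]

theorem pvMatD_nodup (best : PySem.Dict (String × String) Int)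
    (nbrs : PySem.Dict String (List String)) (h : nbrs.keys.Nodup) :
    (pvMatD best nbrs).keys.Nodup := by rw [pvMatD_keys]; exact h

theorem pvMatD_getD (best : PySem.Dict (String × String) Int)
    (nbrs : PySem.Dict String (List String)) (c : String) (ds : List String)
    (h : nbrs.get? c = some ds) (hnd : nbrs.keys.Nodup) :
    (pvMatD best nbrs).getD c PySem.Dict.empty = pvInner best c ds := by
  apply PySem.Dict.getD_of_mem_items
  · exact List.mem_map_of_mem (PySem.Dict.mem_items_of_get?_eq_some nbrs h)
  · exact pvMatD_nodup best nbrs hnd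

-- congruence over the items of nbrs, feeding each entry its get? fact
theorem pv_map_items_congr {β : Type} (nbrs : PySem.Dict String (List String))
    (hnd : nbrs.keys.Nodup) (f g : String × List String → β)
    (h : ∀ c ds, nbrs.get? c = some ds → f (c, ds) = g (c, ds)) :
    nbrs.items.map f = nbrs.items.map g := by
  apply List.map_congr_left
  rintro ⟨c, ds⟩ hp
  exact h c ds (PySem.Dict.get?_of_mem_items nbrs hp hnd)

-- empty.insert x L is the singleton materialized inner dict
theorem pv_empty_insert_eq_inner (best : PySem.Dict (String × String) Int) (c x : String)
    (L : Int) (h : best.getD (pvCanon c x) 0 = L) :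
    (PySem.Dict.empty : PySem.Dict String Int).insert x L = pvInner best c [x] := by
  apply PySem.Dict.ext
  rw [PySem.Dict.items_insert_of_not_contains _ L (PySem.Dict.contains_empty x)]
  simp only [pvInner, pv_items_mk, List.map_cons, List.map_nil, h]
  rfl

-- ---- the per-street commutation lemmas ----

-- case: the endpoint pair is already indexed (skip or lower both symmetric entries in place)
theorem pv_update_mem (a b : String) (L : Int) (best : PySem.Dict (String × String) Int)
    (nbrs : PySem.Dict String (List String))
    (hnn : nbrs.keys.Nodup)
    (hbla : b ∈ nbrs.getD a []) (halb : a ∈ nbrs.getD b []) :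
    pvUpdate (pvMatD best nbrs) a b L = pvMatD (best.insert (pvCanon a b) L) nbrs := by
  have hca : nbrs.contains a = true := pv_contains_of_mem_getD nbrs a hbla
  have hcb : nbrs.contains b = true := pv_contains_of_mem_getD nbrs b halb
  have hga : nbrs.get? a = some (nbrs.getD a []) := pv_get?_of_contains nbrs a [] hca
  have hgb : nbrs.get? b = some (nbrs.getD b []) := pv_get?_of_contains nbrs b [] hcb
  by_cases hab : a = b
  · subst hab
    unfold pvUpdate
    simp only
    rw [pvMatD_getD best nbrs a _ hga hnn]
    rw [pvInner_insert_mem best a a L _ hbla]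
    rw [PySem.Dict.getD_insert_self]
    rw [pvInner_insert_mem _ a a L _ hbla]
    rw [PySem.Dict.insert_insert_self best]
    rw [PySem.Dict.insert_insert_self]
    apply PySem.Dict.ext
    rw [PySem.Dict.items_insert_of_contains _ _ (by rw [pvMatD_contains]; exact hca)]
    simp only [pvMatD, pv_items_mk, List.map_map]
    apply pv_map_items_congr nbrs hnn
    intro c ds hc
    simp only [Function.comp_def]
    by_cases hc_a : c = a
    · subst hc_a
      have hds : ds = nbrs.getD c [] := (Option.some.inj (hga ▸ hc)).symm
      subst hds
      simp
    · simp only [beq_iff_eq, hc_a, if_false]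
      rw [pvInner_congr_of_ne best L ds hc_a hc_a]
  · unfold pvUpdate
    simp only
    rw [pvMatD_getD best nbrs a _ hga hnn]
    rw [pvInner_insert_mem best a b L _ hbla]
    rw [PySem.Dict.getD_insert_of_ne _ _ _ (Ne.symm hab)]
    rw [pvMatD_getD best nbrs b _ hgb hnn]
    rw [pvInner_insert_mem best b a L _ halb]
    rw [pvCanon_comm b a]
    apply PySem.Dict.ext
    rw [PySem.Dict.items_insert_of_contains _ _
      (by rw [PySem.Dict.contains_insert, pvMatD_contains, hcb]; simp)]
    rw [PySem.Dict.items_insert_of_contains _ _ (by rw [pvMatD_contains]; exact hca)]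
    simp only [pvMatD, pv_items_mk, List.map_map]
    apply pv_map_items_congr nbrs hnn
    intro c ds hc
    simp only [Function.comp_def]
    by_cases hc_a : c = a
    · subst hc_a
      have hds : ds = nbrs.getD c [] := (Option.some.inj (hga ▸ hc)).symm
      subst hds
      simp [hab]
    · by_cases hc_b : c = b
      · subst hc_b
        have hds : ds = nbrs.getD c [] := (Option.some.inj (hgb ▸ hc)).symm
        subst hds
        simp [hc_a]
      · simp only [beq_iff_eq, hc_a, hc_b, if_false]
        rw [pvInner_congr_of_ne best L ds hc_a hc_b]

theorem pv_core_old (a b : String) (L : Int) (best : PySem.Dict (String × String) Int)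
    (nbrs : PySem.Dict String (List String)) (hInv : pvInv best nbrs)
    (hk : best.contains (pvCanon a b) = true) :
    pvCore (pvMatD best nbrs) a b L
      = pvMatD (best.insert (pvCanon a b) (min (best.getD (pvCanon a b) 0) L)) nbrs := by
  obtain ⟨hbn, hnn, hiff, hlnd⟩ := hInv
  have hbla : b ∈ nbrs.getD a [] := (hiff a b).mp hk
  have halb : a ∈ nbrs.getD b [] := (hiff b a).mp (by rw [pvCanon_comm b a]; exact hk)
  have hca : nbrs.contains a = true := pv_contains_of_mem_getD nbrs a hbla
  have hcb : nbrs.contains b = true := pv_contains_of_mem_getD nbrs b halb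
  have hga : nbrs.get? a = some (nbrs.getD a []) := pv_get?_of_contains nbrs a [] hca
  have e1 : pvEnsure (pvMatD best nbrs) a = pvMatD best nbrs := by
    simp [pvEnsure, pvMatD_contains, hca]
  have e2 : pvEnsure (pvMatD best nbrs) b = pvMatD best nbrs := by
    simp [pvEnsure, pvMatD_contains, hcb]
  unfold pvCore
  simp only [e1, e2]
  rw [pvMatD_getD best nbrs a _ hga hnn]
  rw [pvInner_contains, pvInner_getD best a b _ hbla (hlnd a)]
  by_cases hlt : best.getD (pvCanon a b) 0 < L
  · rw [if_pos (by simp [hbla, hlt])]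
    rw [min_eq_left (le_of_lt hlt)]
    rw [pv_insert_getD_self best (pvCanon a b) 0 hk hbn]
  · rw [if_neg (by simp [hlt])]
    rw [min_eq_right (not_lt.mp hlt)]
    exact pv_update_mem a b L best nbrs hnn hbla halb

theorem pv_inv_old (a b : String) (L : Int) (best : PySem.Dict (String × String) Int)
    (nbrs : PySem.Dict String (List String)) (hInv : pvInv best nbrs)
    (hk : best.contains (pvCanon a b) = true) :
    pvInv (best.insert (pvCanon a b) (min (best.getD (pvCanon a b) 0) L)) nbrs := by
  obtain ⟨hbn, hnn, hiff, hlnd⟩ := hInv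
  refine ⟨PySem.Dict.nodup_keys_insert _ _ _ hbn, hnn, ?_, hlnd⟩
  intro a' b'
  rw [PySem.Dict.contains_insert]
  by_cases h : pvCanon a' b' = pvCanon a b
  · constructor
    · intro _
      exact (hiff a' b').mp (by rw [h]; exact hk)
    · intro _
      simp [h]
  · have hbe : (pvCanon a' b' == pvCanon a b) = false := by simp [h]
    rw [hbe, Bool.false_or]
    exact hiff a' b'

-- case: the endpoint pair is new
theorem pv_core_new (a b : String) (L : Int) (best : PySem.Dict (String × String) Int)
    (nbrs : PySem.Dict String (List String)) (hInv : pvInv best nbrs)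
    (hk : best.contains (pvCanon a b) = false) :
    pvCore (pvMatD best nbrs) a b L
      = pvMatD (best.insert (pvCanon a b) L) (pvAddPair nbrs a b) := by
  obtain ⟨hbn, hnn, hiff, hlnd⟩ := hInv
  have hbla : b ∉ nbrs.getD a [] := by
    intro hm
    have := (hiff a b).mpr hm
    rw [hk] at this
    exact Bool.noConfusion this
  have halb : a ∉ nbrs.getD b [] := by
    intro hm
    have := (hiff b a).mpr hm
    rw [pvCanon_comm b a, hk] at this
    exact Bool.noConfusion this
  by_cases hab : a = b
  · -- self loop
    subst hab
    have hpa : pvAddPair nbrs a a = nbrs.insert a (nbrs.getD a [] ++ [a]) := by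
      simp [pvAddPair]
    rw [hpa]
    cases hca : nbrs.contains a with
    | true =>
      have hga : nbrs.get? a = some (nbrs.getD a []) := pv_get?_of_contains nbrs a [] hca
      have e1 : pvEnsure (pvMatD best nbrs) a = pvMatD best nbrs := by
        simp [pvEnsure, pvMatD_contains, hca]
      unfold pvCore
      simp only [e1]
      rw [pvMatD_getD best nbrs a _ hga hnn]
      rw [pvInner_contains]
      rw [if_neg (by simp [hbla])]
      unfold pvUpdate
      simp only
      rw [pvMatD_getD best nbrs a _ hga hnn]
      rw [pvInner_insert_not_mem best a a L _ hbla]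
      rw [PySem.Dict.getD_insert_self]
      rw [pvInner_insert_mem _ a a L _ (by simp)]
      rw [PySem.Dict.insert_insert_self best]
      rw [PySem.Dict.insert_insert_self]
      apply PySem.Dict.ext
      rw [PySem.Dict.items_insert_of_contains _ _ (by rw [pvMatD_contains]; exact hca)]
      rw [show (pvMatD (best.insert (pvCanon a a) L) (nbrs.insert a (nbrs.getD a [] ++ [a]))).items
            = (nbrs.insert a (nbrs.getD a [] ++ [a])).items.map
                (fun p => (p.1, pvInner (best.insert (pvCanon a a) L) p.1 p.2)) from rfl]
      rw [PySem.Dict.items_insert_of_contains nbrs _ hca]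
      simp only [pvMatD, pv_items_mk, List.map_map]
      apply pv_map_items_congr nbrs hnn
      intro c ds hc
      simp only [Function.comp_def]
      by_cases hc_a : c = a
      · subst hc_a
        have hds : ds = nbrs.getD c [] := (Option.some.inj (hga ▸ hc)).symm
        subst hds
        simp
      · simp only [beq_iff_eq, hc_a, if_false]
        rw [pvInner_congr_of_ne best L ds hc_a hc_a]
    | false =>
      have hla : nbrs.getD a [] = [] := PySem.Dict.getD_of_not_contains nbrs ([]) hca
      have e1 : pvEnsure (pvMatD best nbrs) a = (pvMatD best nbrs).insert a PySem.Dict.empty := by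
        simp [pvEnsure, pvMatD_contains, hca]
      have e2 : pvEnsure ((pvMatD best nbrs).insert a PySem.Dict.empty) a
          = (pvMatD best nbrs).insert a PySem.Dict.empty := by
        simp [pvEnsure, PySem.Dict.contains_insert]
      unfold pvCore
      simp only [e1, e2]
      rw [PySem.Dict.getD_insert_self]
      rw [if_neg (by simp [PySem.Dict.contains_empty])]
      unfold pvUpdate
      simp only
      rw [PySem.Dict.getD_insert_self]
      rw [PySem.Dict.insert_insert_self]
      rw [PySem.Dict.getD_insert_self]
      rw [PySem.Dict.insert_insert_self]
      rw [PySem.Dict.insert_insert_self]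
      have hsing : (PySem.Dict.empty : PySem.Dict String Int).insert a L
          = pvInner (best.insert (pvCanon a a) L) a [a] :=
        pv_empty_insert_eq_inner _ a a L (PySem.Dict.getD_insert_self _ _ _ _)
      rw [hsing]
      apply PySem.Dict.ext
      rw [PySem.Dict.items_insert_of_not_contains _ _ (by rw [pvMatD_contains]; exact hca)]
      rw [show (pvMatD (best.insert (pvCanon a a) L) (nbrs.insert a (nbrs.getD a [] ++ [a]))).items
            = (nbrs.insert a (nbrs.getD a [] ++ [a])).items.map
                (fun p => (p.1, pvInner (best.insert (pvCanon a a) L) p.1 p.2)) from rfl]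
      rw [PySem.Dict.items_insert_of_not_contains nbrs _ hca]
      rw [hla]
      simp only [pvMatD, pv_items_mk, List.map_append, List.map_cons, List.map_nil,
        List.nil_append]
      congr 1
      apply pv_map_items_congr nbrs hnn
      intro c ds hc
      have hc_a : c ≠ a := fun h => pv_not_mem_keys nbrs hca (h ▸ pv_mem_keys_of_get? nbrs hc)
      simp only
      rw [pvInner_congr_of_ne best L ds hc_a hc_a]
  · -- a ≠ b
    have hpa : pvAddPair nbrs a b
        = (nbrs.insert a (nbrs.getD a [] ++ [b])).insert b (nbrs.getD b [] ++ [a]) := by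
      unfold pvAddPair
      simp only [if_neg hab]
      rw [PySem.Dict.getD_insert_of_ne _ _ _ (Ne.symm hab)]
    rw [hpa]
    cases hca : nbrs.contains a with
    | true =>
      have hga : nbrs.get? a = some (nbrs.getD a []) := pv_get?_of_contains nbrs a [] hca
      have e1 : pvEnsure (pvMatD best nbrs) a = pvMatD best nbrs := by
        simp [pvEnsure, pvMatD_contains, hca]
      cases hcb : nbrs.contains b with
      | true =>
        have hgb : nbrs.get? b = some (nbrs.getD b []) := pv_get?_of_contains nbrs b [] hcb
        have e2 : pvEnsure (pvMatD best nbrs) b = pvMatD best nbrs := by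
          simp [pvEnsure, pvMatD_contains, hcb]
        unfold pvCore
        simp only [e1, e2]
        rw [pvMatD_getD best nbrs a _ hga hnn, pvInner_contains]
        rw [if_neg (by simp [hbla])]
        unfold pvUpdate
        simp only
        rw [pvMatD_getD best nbrs a _ hga hnn]
        rw [pvInner_insert_not_mem best a b L _ hbla]
        rw [PySem.Dict.getD_insert_of_ne _ _ _ (Ne.symm hab)]
        rw [pvMatD_getD best nbrs b _ hgb hnn]
        rw [pvInner_insert_not_mem best b a L _ halb]
        rw [pvCanon_comm b a]
        apply PySem.Dict.ext
        rw [PySem.Dict.items_insert_of_contains _ _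
          (by rw [PySem.Dict.contains_insert, pvMatD_contains, hcb]; simp)]
        rw [PySem.Dict.items_insert_of_contains _ _ (by rw [pvMatD_contains]; exact hca)]
        rw [show (pvMatD (best.insert (pvCanon a b) L)
              ((nbrs.insert a (nbrs.getD a [] ++ [b])).insert b (nbrs.getD b [] ++ [a]))).items
            = ((nbrs.insert a (nbrs.getD a [] ++ [b])).insert b (nbrs.getD b [] ++ [a])).items.map
                (fun p => (p.1, pvInner (best.insert (pvCanon a b) L) p.1 p.2)) from rfl]
        rw [PySem.Dict.items_insert_of_contains _ _
          (by rw [PySem.Dict.contains_insert]; simp [hcb])]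
        rw [PySem.Dict.items_insert_of_contains nbrs _ hca]
        simp only [pvMatD, pv_items_mk, List.map_map]
        apply pv_map_items_congr nbrs hnn
        intro c ds hc
        simp only [Function.comp_def]
        by_cases hc_a : c = a
        · subst hc_a
          have hds : ds = nbrs.getD c [] := (Option.some.inj (hga ▸ hc)).symm
          subst hds
          simp [hab]
        · by_cases hc_b : c = b
          · subst hc_b
            have hds : ds = nbrs.getD c [] := (Option.some.inj (hgb ▸ hc)).symm
            subst hds
            simp [hc_a]
          · simp only [beq_iff_eq, hc_a, hc_b, if_false]
            rw [pvInner_congr_of_ne best L ds hc_a hc_b]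
      | false =>
        have hlb : nbrs.getD b [] = [] := PySem.Dict.getD_of_not_contains nbrs ([]) hcb
        have e2 : pvEnsure (pvMatD best nbrs) b
            = (pvMatD best nbrs).insert b PySem.Dict.empty := by
          simp [pvEnsure, pvMatD_contains, hcb]
        unfold pvCore
        simp only [e1, e2]
        rw [PySem.Dict.getD_insert_of_ne _ _ _ hab]
        rw [pvMatD_getD best nbrs a _ hga hnn, pvInner_contains]
        rw [if_neg (by simp [hbla])]
        unfold pvUpdate
        simp only
        rw [PySem.Dict.getD_insert_of_ne _ _ _ hab]
        rw [pvMatD_getD best nbrs a _ hga hnn]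
        rw [pvInner_insert_not_mem best a b L _ hbla]
        rw [PySem.Dict.getD_insert_of_ne _ _ _ (Ne.symm hab), PySem.Dict.getD_insert_self]
        rw [pv_empty_insert_eq_inner (best.insert (pvCanon a b) L) b a L
          (by rw [pvCanon_comm b a]; exact PySem.Dict.getD_insert_self best _ L 0)]
        apply PySem.Dict.ext
        rw [PySem.Dict.items_insert_of_contains _ _
          (by rw [PySem.Dict.contains_insert, PySem.Dict.contains_insert]; simp)]
        rw [PySem.Dict.items_insert_of_contains _ _
          (by rw [PySem.Dict.contains_insert, pvMatD_contains, hca]; simp)]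
        rw [PySem.Dict.items_insert_of_not_contains _ _ (by rw [pvMatD_contains]; exact hcb)]
        rw [show (pvMatD (best.insert (pvCanon a b) L)
              ((nbrs.insert a (nbrs.getD a [] ++ [b])).insert b (nbrs.getD b [] ++ [a]))).items
            = ((nbrs.insert a (nbrs.getD a [] ++ [b])).insert b (nbrs.getD b [] ++ [a])).items.map
                (fun p => (p.1, pvInner (best.insert (pvCanon a b) L) p.1 p.2)) from rfl]
        rw [PySem.Dict.items_insert_of_not_contains _ _
          (by rw [PySem.Dict.contains_insert]; simp [hcb, Ne.symm hab])]
        rw [PySem.Dict.items_insert_of_contains nbrs _ hca]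
        rw [hlb]
        simp only [pvMatD, pv_items_mk, List.map_append, List.map_map, List.map_cons,
          List.map_nil]
        congr 1
        · apply pv_map_items_congr nbrs hnn
          intro c ds hc
          simp only [Function.comp_def]
          have hc_b : c ≠ b := fun h => pv_not_mem_keys nbrs hcb (h ▸ pv_mem_keys_of_get? nbrs hc)
          by_cases hc_a : c = a
          · subst hc_a
            have hds : ds = nbrs.getD c [] := (Option.some.inj (hga ▸ hc)).symm
            subst hds
            simp [hc_b]
          · simp only [beq_iff_eq, hc_a, hc_b, if_false]
            rw [pvInner_congr_of_ne best L ds hc_a hc_b]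
        · simp [Ne.symm hab]
    | false =>
      have hla : nbrs.getD a [] = [] := PySem.Dict.getD_of_not_contains nbrs ([]) hca
      have e1 : pvEnsure (pvMatD best nbrs) a = (pvMatD best nbrs).insert a PySem.Dict.empty := by
        simp [pvEnsure, pvMatD_contains, hca]
      cases hcb : nbrs.contains b with
      | true =>
        have hgb : nbrs.get? b = some (nbrs.getD b []) := pv_get?_of_contains nbrs b [] hcb
        have e2 : pvEnsure ((pvMatD best nbrs).insert a PySem.Dict.empty) b
            = (pvMatD best nbrs).insert a PySem.Dict.empty := by
          simp [pvEnsure, PySem.Dict.contains_insert, pvMatD_contains, hcb]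
        unfold pvCore
        simp only [e1, e2]
        rw [PySem.Dict.getD_insert_self]
        rw [if_neg (by simp [PySem.Dict.contains_empty])]
        unfold pvUpdate
        simp only
        rw [PySem.Dict.getD_insert_self]
        rw [PySem.Dict.insert_insert_self]
        rw [pv_empty_insert_eq_inner (best.insert (pvCanon a b) L) a b L
          (PySem.Dict.getD_insert_self best _ L 0)]
        rw [PySem.Dict.getD_insert_of_ne _ _ _ (Ne.symm hab)]
        rw [pvMatD_getD best nbrs b _ hgb hnn]
        rw [pvInner_insert_not_mem best b a L _ halb, pvCanon_comm b a]
        apply PySem.Dict.ext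
        rw [PySem.Dict.items_insert_of_contains _ _
          (by rw [PySem.Dict.contains_insert, pvMatD_contains, hcb]; simp)]
        rw [PySem.Dict.items_insert_of_not_contains _ _ (by rw [pvMatD_contains]; exact hca)]
        rw [show (pvMatD (best.insert (pvCanon a b) L)
              ((nbrs.insert a (nbrs.getD a [] ++ [b])).insert b (nbrs.getD b [] ++ [a]))).items
            = ((nbrs.insert a (nbrs.getD a [] ++ [b])).insert b (nbrs.getD b [] ++ [a])).items.map
                (fun p => (p.1, pvInner (best.insert (pvCanon a b) L) p.1 p.2)) from rfl]
        rw [PySem.Dict.items_insert_of_contains _ _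
          (by rw [PySem.Dict.contains_insert]; simp [hcb])]
        rw [PySem.Dict.items_insert_of_not_contains nbrs _ hca]
        rw [hla]
        simp only [pvMatD, pv_items_mk, List.map_append, List.map_map, List.map_cons,
          List.map_nil, List.nil_append]
        congr 1
        · apply pv_map_items_congr nbrs hnn
          intro c ds hc
          simp only [Function.comp_def]
          have hc_a : c ≠ a := fun h => pv_not_mem_keys nbrs hca (h ▸ pv_mem_keys_of_get? nbrs hc)
          by_cases hc_b : c = b
          · subst hc_b
            have hds : ds = nbrs.getD c [] := (Option.some.inj (hgb ▸ hc)).symm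
            subst hds
            simp [hc_a]
          · simp only [beq_iff_eq, hc_a, hc_b, if_false]
            rw [pvInner_congr_of_ne best L ds hc_a hc_b]
        · simp [hab]
      | false =>
        have hlb : nbrs.getD b [] = [] := PySem.Dict.getD_of_not_contains nbrs ([]) hcb
        have e2 : pvEnsure ((pvMatD best nbrs).insert a PySem.Dict.empty) b
            = ((pvMatD best nbrs).insert a PySem.Dict.empty).insert b PySem.Dict.empty := by
          simp [pvEnsure, PySem.Dict.contains_insert, pvMatD_contains, hcb, Ne.symm hab]
        unfold pvCore
        simp only [e1, e2]
        rw [PySem.Dict.getD_insert_of_ne _ _ _ hab, PySem.Dict.getD_insert_self]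
        rw [if_neg (by simp [PySem.Dict.contains_empty])]
        unfold pvUpdate
        simp only
        rw [PySem.Dict.getD_insert_of_ne _ _ _ hab, PySem.Dict.getD_insert_self]
        rw [pv_empty_insert_eq_inner (best.insert (pvCanon a b) L) a b L
          (PySem.Dict.getD_insert_self best _ L 0)]
        rw [PySem.Dict.getD_insert_of_ne _ _ _ (Ne.symm hab), PySem.Dict.getD_insert_self]
        rw [pv_empty_insert_eq_inner (best.insert (pvCanon a b) L) b a L
          (by rw [pvCanon_comm b a]; exact PySem.Dict.getD_insert_self best _ L 0)]
        apply PySem.Dict.ext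
        rw [PySem.Dict.items_insert_of_contains _ _
          (by rw [PySem.Dict.contains_insert, PySem.Dict.contains_insert]; simp)]
        rw [PySem.Dict.items_insert_of_contains _ _
          (by rw [PySem.Dict.contains_insert, PySem.Dict.contains_insert]; simp)]
        rw [PySem.Dict.items_insert_of_not_contains _ _
          (by rw [PySem.Dict.contains_insert, pvMatD_contains]; simp [hcb, Ne.symm hab])]
        rw [PySem.Dict.items_insert_of_not_contains _ _ (by rw [pvMatD_contains]; exact hca)]
        rw [show (pvMatD (best.insert (pvCanon a b) L)
              ((nbrs.insert a (nbrs.getD a [] ++ [b])).insert b (nbrs.getD b [] ++ [a]))).items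
            = ((nbrs.insert a (nbrs.getD a [] ++ [b])).insert b (nbrs.getD b [] ++ [a])).items.map
                (fun p => (p.1, pvInner (best.insert (pvCanon a b) L) p.1 p.2)) from rfl]
        rw [PySem.Dict.items_insert_of_not_contains _ _
          (by rw [PySem.Dict.contains_insert]; simp [hcb, Ne.symm hab])]
        rw [PySem.Dict.items_insert_of_not_contains nbrs _ hca]
        rw [hla, hlb]
        simp only [pvMatD, pv_items_mk, List.map_append, List.map_map, List.map_cons,
          List.map_nil, List.nil_append]
        congr 1
        · congr 1
          · apply pv_map_items_congr nbrs hnn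
            intro c ds hc
            simp only [Function.comp_def]
            have hc_a : c ≠ a := fun h =>
              pv_not_mem_keys nbrs hca (h ▸ pv_mem_keys_of_get? nbrs hc)
            have hc_b : c ≠ b := fun h =>
              pv_not_mem_keys nbrs hcb (h ▸ pv_mem_keys_of_get? nbrs hc)
            simp only [beq_iff_eq, hc_a, hc_b, if_false]
            rw [pvInner_congr_of_ne best L ds hc_a hc_b]
          · simp [hab, Ne.symm hab]
        · simp [hab, Ne.symm hab]

theorem pv_inv_new (a b : String) (L : Int) (best : PySem.Dict (String × String) Int)
    (nbrs : PySem.Dict String (List String)) (hInv : pvInv best nbrs)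
    (hk : best.contains (pvCanon a b) = false) :
    pvInv (best.insert (pvCanon a b) L) (pvAddPair nbrs a b) := by
  obtain ⟨hbn, hnn, hiff, hlnd⟩ := hInv
  have hbla : b ∉ nbrs.getD a [] := by
    intro hm
    have := (hiff a b).mpr hm
    rw [hk] at this
    exact Bool.noConfusion this
  have halb : a ∉ nbrs.getD b [] := by
    intro hm
    have := (hiff b a).mpr hm
    rw [pvCanon_comm b a, hk] at this
    exact Bool.noConfusion this
  by_cases hab : a = b
  · subst hab
    have hpa : pvAddPair nbrs a a = nbrs.insert a (nbrs.getD a [] ++ [a]) := by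
      simp [pvAddPair]
    rw [hpa]
    have hgd : ∀ c, (nbrs.insert a (nbrs.getD a [] ++ [a])).getD c []
        = if c = a then nbrs.getD a [] ++ [a] else nbrs.getD c [] := by
      intro c
      rw [PySem.Dict.getD_insert]
    refine ⟨PySem.Dict.nodup_keys_insert _ _ _ hbn,
      PySem.Dict.nodup_keys_insert _ _ _ hnn, ?_, ?_⟩
    · intro a' b'
      rw [PySem.Dict.contains_insert, hgd a']
      by_cases h1 : pvCanon a' b' = pvCanon a a
      · have h2 : a' = a ∧ b' = a := by
          rcases pvCanon_elim h1 with ⟨x, y⟩ | ⟨x, y⟩ <;> exact ⟨x, y⟩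
        constructor
        · intro _
          rw [if_pos h2.1, h2.2]
          exact List.mem_append_right _ (List.mem_singleton_self _)
        · intro _
          simp [h1]
      · have hbe : (pvCanon a' b' == pvCanon a a) = false := by simp [h1]
        rw [hbe, Bool.false_or]
        by_cases h2 : a' = a
        · rw [if_pos h2, h2]
          constructor
          · intro h
            exact List.mem_append_left _ ((hiff a b').mp h)
          · intro h
            rcases List.mem_append.mp h with h | h
            · exact (hiff a b').mpr h
            · rw [List.mem_singleton] at h
              exact absurd (by rw [h2, h]) h1
        · rw [if_neg h2]
          exact hiff a' b'
    · intro c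
      rw [hgd c]
      by_cases h2 : c = a
      · rw [if_pos h2, List.nodup_append]
        refine ⟨hlnd a, List.nodup_singleton _, fun x hx w hw => ?_⟩
        rw [List.mem_singleton] at hw
        subst hw
        exact fun he => hbla (he ▸ hx)
      · rw [if_neg h2]
        exact hlnd c
  · have hpa : pvAddPair nbrs a b
        = (nbrs.insert a (nbrs.getD a [] ++ [b])).insert b (nbrs.getD b [] ++ [a]) := by
      unfold pvAddPair
      simp only [if_neg hab]
      rw [PySem.Dict.getD_insert_of_ne _ _ _ (Ne.symm hab)]
    rw [hpa]
    have hgd : ∀ c, ((nbrs.insert a (nbrs.getD a [] ++ [b])).insert b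
          (nbrs.getD b [] ++ [a])).getD c []
        = if c = b then nbrs.getD b [] ++ [a]
          else if c = a then nbrs.getD a [] ++ [b] else nbrs.getD c [] := by
      intro c
      rw [PySem.Dict.getD_insert]
      by_cases hcb : c = b
      · simp [hcb]
      · rw [if_neg hcb, if_neg hcb, PySem.Dict.getD_insert]
    refine ⟨PySem.Dict.nodup_keys_insert _ _ _ hbn,
      PySem.Dict.nodup_keys_insert _ _ _ (PySem.Dict.nodup_keys_insert _ _ _ hnn), ?_, ?_⟩
    · intro a' b'
      rw [PySem.Dict.contains_insert, hgd a']
      by_cases h1 : pvCanon a' b' = pvCanon a b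
      · constructor
        · intro _
          rcases pvCanon_elim h1 with ⟨h2, h3⟩ | ⟨h2, h3⟩
          · rw [if_neg (by rw [h2]; exact hab), if_pos h2, h3]
            exact List.mem_append_right _ (List.mem_singleton_self _)
          · rw [if_pos h2, h3]
            exact List.mem_append_right _ (List.mem_singleton_self _)
        · intro _
          simp [h1]
      · have hbe : (pvCanon a' b' == pvCanon a b) = false := by simp [h1]
        rw [hbe, Bool.false_or]
        by_cases h2 : a' = b
        · rw [if_pos h2, h2]
          constructor
          · intro h
            exact List.mem_append_left _ ((hiff b b').mp h)
          · intro h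
            rcases List.mem_append.mp h with h | h
            · exact (hiff b b').mpr h
            · rw [List.mem_singleton] at h
              exact absurd (by rw [h2, h]; exact pvCanon_comm b a) h1
        · by_cases h3 : a' = a
          · rw [if_neg h2, if_pos h3, h3]
            constructor
            · intro h
              exact List.mem_append_left _ ((hiff a b').mp h)
            · intro h
              rcases List.mem_append.mp h with h | h
              · exact (hiff a b').mpr h
              · rw [List.mem_singleton] at h
                exact absurd (by rw [h3, h]) h1
          · rw [if_neg h2, if_neg h3]
            exact hiff a' b'
    · intro c
      rw [hgd c]
      by_cases h2 : c = b
      · rw [if_pos h2, List.nodup_append]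
        refine ⟨hlnd b, List.nodup_singleton _, fun x hx w hw => ?_⟩
        rw [List.mem_singleton] at hw
        subst hw
        exact fun he => halb (he ▸ hx)
      · by_cases h3 : c = a
        · rw [if_neg h2, if_pos h3, List.nodup_append]
          refine ⟨hlnd a, List.nodup_singleton _, fun x hx w hw => ?_⟩
          rw [List.mem_singleton] at hw
          subst hw
          exact fun he => hbla (he ▸ hx)
        · rw [if_neg h2, if_neg h3]
          exact hlnd c

-- one street, at the String level
theorem pvStep_commute (rua : String) (h : rua.toList ≠ [])
    (best : PySem.Dict (String × String) Int) (nbrs : PySem.Dict String (List String))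
    (hInv : pvInv best nbrs) :
    pvStepA (pvMatD best nbrs) rua
      = pvMatD (pvStepB (best, nbrs) rua).1 (pvStepB (best, nbrs) rua).2 := by
  obtain ⟨c, t, hct⟩ := List.exists_cons_of_ne_nil h
  cases e0 : PySem.Str.pyGet? rua 0 with
  | none => exfalso; simp [hct] at e0
  | some c1 =>
    cases e1 : PySem.Str.pyGet? rua (-1) with
    | none => exfalso; simp [hct, PySem.List.pyGet?_neg_one] at e1
    | some c2 =>
      simp only [pvStepA, pvStepB, e0, e1]
      by_cases hk : best.contains (pvCanon (String.ofList [c1]) (String.ofList [c2])) = true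
      · simp only [hk, if_true]
        exact pv_core_old _ _ _ best nbrs hInv hk
      · rw [Bool.not_eq_true] at hk
        simp only [hk, Bool.false_eq_true, if_false]
        exact pv_core_new _ _ _ best nbrs hInv hk

theorem pvStep_inv (rua : String) (best : PySem.Dict (String × String) Int)
    (nbrs : PySem.Dict String (List String)) (hInv : pvInv best nbrs) :
    pvInv (pvStepB (best, nbrs) rua).1 (pvStepB (best, nbrs) rua).2 := by
  cases e0 : PySem.Str.pyGet? rua 0 with
  | none => simp only [pvStepB, e0]; exact hInv
  | some c1 =>
    cases e1 : PySem.Str.pyGet? rua (-1) with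
    | none => simp only [pvStepB, e0, e1]; exact hInv
    | some c2 =>
      simp only [pvStepB, e0, e1]
      by_cases hk : best.contains (pvCanon (String.ofList [c1]) (String.ofList [c2])) = true
      · simp only [hk, if_true]
        exact pv_inv_old _ _ _ best nbrs hInv hk
      · rw [Bool.not_eq_true] at hk
        simp only [hk, Bool.false_eq_true, if_false]
        exact pv_inv_new _ _ _ best nbrs hInv hk

theorem pv_fold_commute (l : List String) :
    ∀ (best : PySem.Dict (String × String) Int) (nbrs : PySem.Dict String (List String)),
    (∀ r ∈ l, r.toList ≠ []) → pvInv best nbrs →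
    l.foldl pvStepA (pvMatD best nbrs)
      = pvMatD (l.foldl pvStepB (best, nbrs)).1 (l.foldl pvStepB (best, nbrs)).2 := by
  induction l with
  | nil => intro best nbrs _ _; rfl
  | cons r l ih =>
    intro best nbrs hpre hInv
    have hr : r.toList ≠ [] := hpre r (List.mem_cons_self ..)
    have hstep := pvStep_commute r hr best nbrs hInv
    have hinv' := pvStep_inv r best nbrs hInv
    simp only [List.foldl_cons]
    rw [hstep]
    have := ih (pvStepB (best, nbrs) r).1 (pvStepB (best, nbrs) r).2
      (fun x hx => hpre x (List.mem_cons_of_mem _ hx)) hinv'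
    simpa using this

theorem pv_inv_empty : pvInv PySem.Dict.empty PySem.Dict.empty := by
  refine ⟨List.nodup_nil, List.nodup_nil, ?_, ?_⟩
  · intro a b
    simp [PySem.Dict.contains_empty, PySem.Dict.getD_empty]
  · intro a
    simp [PySem.Dict.getD_empty]

-- ===== VERDICT (by name: the statement is the Claim_ definition above) =====
theorem constroi_cidade_spec : Claim_equal_constroi_cidade := by
  intro ruas _ hpre
  unfold Spec_constroi_cidade constroi_cidade constroi_cidade_alt
  have h0 : (PySem.Dict.empty : PySem.Dict String (PySem.Dict String Int))
      = pvMatD PySem.Dict.empty PySem.Dict.empty := rfl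
  rw [h0, pv_fold_commute ruas PySem.Dict.empty PySem.Dict.empty hpre pv_inv_empty]
  simp only [pvMatD, pvInner, pv_items_mk, List.map_map]
  rfl
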